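-- pv_equiv track=rewrite | github.com/ChainsawRambo/NJIT-CS-100 | Practice Midterm 2 2018 Spring.py | analyzeAreaCodes
-- ===== SOURCE A (Python) =====
-- def analyzeAreaCodes(phones):
--     d = {}
--     for phone in phones:
--         if phone[0:3] not in d:
--             d[phone[0:3]] = 1
--         else:
--             d[phone[0:3]] +=1
--     return d
-- ===== SOURCE B (Python) =====
-- def analyzeAreaCodes(phones):
--     keys = [phone[0:3] for phone in phones]
--     seen = []
--     for k in keys:
--         if k not in seen:
--             seen.append(k)
--     return {k: keys.count(k) for k in seen}
-- ===== Notes on version B (the rewrite author's own statement) =====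
-- stated objective: alternative
-- what changed: B never keeps running counts: it builds the first-occurrence list of distinct prefixes and then computes each count independently with a full list.count scan in a dict comprehension (nested-scan grouping), instead of A's single pass that tests dict membership and increments an entry per element.
import Mathlib
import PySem

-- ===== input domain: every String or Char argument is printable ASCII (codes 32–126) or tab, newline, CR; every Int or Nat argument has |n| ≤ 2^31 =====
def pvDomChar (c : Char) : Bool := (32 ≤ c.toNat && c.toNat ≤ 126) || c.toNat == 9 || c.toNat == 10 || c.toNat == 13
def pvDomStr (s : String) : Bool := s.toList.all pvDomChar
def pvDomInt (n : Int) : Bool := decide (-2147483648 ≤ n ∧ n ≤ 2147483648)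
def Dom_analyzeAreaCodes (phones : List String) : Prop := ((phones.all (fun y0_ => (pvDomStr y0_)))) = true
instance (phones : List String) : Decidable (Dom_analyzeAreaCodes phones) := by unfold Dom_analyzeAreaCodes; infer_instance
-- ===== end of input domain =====

-- B keeps no running counts: it collects the distinct prefixes in first-occurrence order and
-- computes each count independently by a full scan (list.count), instead of A's single
-- membership-test-and-increment pass; an alternative decomposition, not faster.

-- ===== PORT A =====
def analyzeAreaCodes (phones : List String) : List (String × Int) :=
  (phones.foldl (fun d phone =>
      if d.contains (PySem.Str.slice phone (some 0) (some 3)) = false then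
        d.insert (PySem.Str.slice phone (some 0) (some 3)) 1
      else
        d.insert (PySem.Str.slice phone (some 0) (some 3))
          (d.getD (PySem.Str.slice phone (some 0) (some 3)) 0 + 1))
    PySem.Dict.empty).items

-- ===== PORT B =====
def analyzeAreaCodes_alt (phones : List String) : List (String × Int) :=
  let keys := phones.map (fun phone => PySem.Str.slice phone (some 0) (some 3))
  let seen := keys.foldl (fun s k => if s.contains k = false then s ++ [k] else s) ([] : List String)
  (seen.foldl (fun d k => d.insert k (keys.count k : Int)) PySem.Dict.empty).items

-- ===== PRECONDITION & SPEC =====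
def Spec_analyzeAreaCodes (phones : List String) (out : List (String × Int)) : Prop := out = analyzeAreaCodes_alt phones
instance (phones : List String) (out : List (String × Int)) : Decidable (Spec_analyzeAreaCodes phones out) := by unfold Spec_analyzeAreaCodes; infer_instance

-- ===== CLAIM (what is proved, stated in full; the proofs are below) =====
def Claim_equal_analyzeAreaCodes : Prop := ∀ (phones : List String), Dom_analyzeAreaCodes phones → Spec_analyzeAreaCodes phones (analyzeAreaCodes phones)

-- ===== LEMMAS AND PROOFS =====

-- A's loop step equals the unconditional counting insert.
theorem analyzeAreaCodes_step_eq (d : PySem.Dict String Int) (k : String) :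
    (if d.contains k = false then d.insert k 1 else d.insert k (d.getD k 0 + 1))
      = d.insert k (d.getD k 0 + 1) := by
  by_cases h : d.contains k = false
  · simp [h, PySem.Dict.getD_of_not_contains d (0 : Int) h]
  · simp [h]

-- A's dict is Counter of the prefix list.
theorem analyzeAreaCodes_dict_eq_counter (phones : List String) :
    (phones.foldl (fun d phone =>
        if d.contains (PySem.Str.slice phone (some 0) (some 3)) = false then
          d.insert (PySem.Str.slice phone (some 0) (some 3)) 1
        else
          d.insert (PySem.Str.slice phone (some 0) (some 3))
            (d.getD (PySem.Str.slice phone (some 0) (some 3)) 0 + 1))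
      PySem.Dict.empty)
      = PySem.Dict.counter (phones.map (fun phone => PySem.Str.slice phone (some 0) (some 3))) := by
  rw [← PySem.Dict.foldl_insert_getD_add_one_eq_counter, List.foldl_map]
  have hstep : (fun (d : PySem.Dict String Int) (phone : String) =>
      if d.contains (PySem.Str.slice phone (some 0) (some 3)) = false then
        d.insert (PySem.Str.slice phone (some 0) (some 3)) 1
      else
        d.insert (PySem.Str.slice phone (some 0) (some 3))
          (d.getD (PySem.Str.slice phone (some 0) (some 3)) 0 + 1))
      = fun d phone => d.insert (PySem.Str.slice phone (some 0) (some 3))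
          (d.getD (PySem.Str.slice phone (some 0) (some 3)) 0 + 1) := by
    funext d phone; exact analyzeAreaCodes_step_eq d (PySem.Str.slice phone (some 0) (some 3))
  rw [hstep]

-- B's seen-accumulating loop step is exactly Set.add.
theorem seen_step_eq : (fun (s : List String) k => if s.contains k = false then s ++ [k] else s)
    = PySem.Set.add := by
  funext s k
  simp [PySem.Set.add]

-- Lookup in a fold inserting a value that depends only on the key: untouched keys unchanged.
theorem getD_foldl_insert_fun_not_mem {ν : Type} (l : List String) (c : String → ν)
    (d : PySem.Dict String ν) (k : String) (v : ν) (h : k ∉ l) :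
    (l.foldl (fun d x => d.insert x (c x)) d).getD k v = d.getD k v := by
  induction l generalizing d with
  | nil => rfl
  | cons x xs ih =>
      simp only [List.foldl_cons]
      rw [ih _ (fun hx => h (List.mem_cons_of_mem _ hx)),
        PySem.Dict.getD_insert_of_ne _ _ _ (fun he => h (by rw [he]; exact List.mem_cons_self))]

-- … and a key that occurs in the list ends at its function value.
theorem getD_foldl_insert_fun_mem {ν : Type} (l : List String) (c : String → ν)
    (d : PySem.Dict String ν) (k : String) (v : ν) (h : k ∈ l) :
    (l.foldl (fun d x => d.insert x (c x)) d).getD k v = c k := by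
  induction l generalizing d with
  | nil => cases h
  | cons x xs ih =>
      simp only [List.foldl_cons]
      by_cases hx : k ∈ xs
      · exact ih _ hx
      · have hk : k = x := by
          rcases List.mem_cons.mp h with h' | h'
          · exact h'
          · exact absurd h' hx
        subst hk
        rw [getD_foldl_insert_fun_not_mem _ _ _ _ _ hx, PySem.Dict.getD_insert_self]

-- B's dict items in canonical (Counter) form.
theorem alt_items_eq (keys : List String) :
    ((keys.foldl (fun s k => if s.contains k = false then s ++ [k] else s) ([] : List String)).foldl
        (fun d k => d.insert k (keys.count k : Int)) PySem.Dict.empty).items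
      = (PySem.Set.ofList keys).map (fun k => (k, (keys.count k : Int))) := by
  have hs : keys.foldl (fun s k => if s.contains k = false then s ++ [k] else s) ([] : List String)
      = PySem.Set.ofList keys := by
    rw [seen_step_eq, ← PySem.Set.ofList_eq_foldl]
  rw [hs]
  have hkeys : ((PySem.Set.ofList keys).foldl (fun d k => d.insert k (keys.count k : Int))
      PySem.Dict.empty).keys = PySem.Set.ofList keys := by
    rw [PySem.Dict.keys_foldl_insert]
    simp [PySem.Set.update_nil_left, PySem.Set.ofList_ofList]
  have hnd : ((PySem.Set.ofList keys).foldl (fun d k => d.insert k (keys.count k : Int))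
      PySem.Dict.empty).keys.Nodup := by
    rw [hkeys]; exact PySem.Set.nodup_ofList _
  rw [PySem.Dict.items_eq_map_keys _ hnd (0 : Int), hkeys]
  refine List.map_congr_left (fun k hk => ?_)
  rw [getD_foldl_insert_fun_mem _ (fun x => (keys.count x : Int)) _ _ _ hk]

-- ===== VERDICT (by name: the statement is the Claim_ definition above) =====
theorem analyzeAreaCodes_spec : Claim_equal_analyzeAreaCodes := by
  intro phones _
  unfold Spec_analyzeAreaCodes
  have h1 : analyzeAreaCodes phones
      = (PySem.Set.ofList (phones.map (fun phone => PySem.Str.slice phone (some 0) (some 3)))).map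
          (fun k => (k, ((phones.map (fun phone => PySem.Str.slice phone (some 0) (some 3))).count k : Int))) := by
    unfold analyzeAreaCodes
    rw [analyzeAreaCodes_dict_eq_counter, PySem.Dict.items_counter]
  rw [h1]
  exact (alt_items_eq _).symm
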